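-- pv_equiv track=rewrite | github.com/eyusti/connect_four | board.py | final_heuristic
-- ===== SOURCE A (Python) =====
-- def final_heuristic(any_list):
--     c_index = 0
--     list_of_potential_winning_symbols = []
--     while c_index < len(any_list) - 3:
--         temp = any_list[c_index: c_index + 4]
--         if temp in [["1","?","?","?"],["?","1","?","?"],["?","?","1","?"],["?","?","?","1"],["2","?","?","?"],["?","2","?","?"],["?","?","2","?"],["?","?","?","2"]]:
--             if "1" in temp:
--                 list_of_potential_winning_symbols.append("1")
--             if "2" in temp:
--                 list_of_potential_winning_symbols.append("2")
--         if temp in [["1","1","?","?"],["1","?","1","?"],["1","?","?","1"],["?","1","1","?"],["?","1","?","1"],["?","?","1","1"],["2","2","?","?"],["2","?","2","?"],["2","?","?","2"],["?","2","2","?"],["?","2","?","2"],["?","?","2","2"]]: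
--             if "1" in temp:
--                 list_of_potential_winning_symbols.append("1")
--                 list_of_potential_winning_symbols.append("1")
--             if "2" in temp:
--                 list_of_potential_winning_symbols.append("2")
--                 list_of_potential_winning_symbols.append("2")
--         if temp in [["?","1","1","1"],["1","?","1","1"],["1","1","?","1"],["1","1","1","?"],["?","2","2","2"],["2","?","2","2"],["2","2","?","2"],["2","2","2","?"]]:
--             if "1" in temp:
--                 list_of_potential_winning_symbols.append("1")
--                 list_of_potential_winning_symbols.append("1")
--                 list_of_potential_winning_symbols.append("1")
--             if "2" in temp:
--                 list_of_potential_winning_symbols.append("2")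
--                 list_of_potential_winning_symbols.append("2")
--                 list_of_potential_winning_symbols.append("2")
--         if temp in [["1","1","1","1"],["2","2","2","2"]]:
--             if "1" in temp:
--                 list_of_potential_winning_symbols.append("1")
--                 list_of_potential_winning_symbols.append("1")
--                 list_of_potential_winning_symbols.append("1")
--                 list_of_potential_winning_symbols.append("1")
--                 list_of_potential_winning_symbols.append("1")
--             if "2" in temp:
--                 list_of_potential_winning_symbols.append("2")
--                 list_of_potential_winning_symbols.append("2")
--                 list_of_potential_winning_symbols.append("2")
--                 list_of_potential_winning_symbols.append("2")
--                 list_of_potential_winning_symbols.append("2")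
--         c_index += 1
--     return list_of_potential_winning_symbols
-- ===== SOURCE B (Python) =====
-- def final_heuristic(any_list):
--     # Sliding-window multiset: maintain a dict of symbol counts for the current
--     # 4-window incrementally (O(1) amortized per position, windows never sliced).
--     out = []
--     cnt = {}
--     for i, s in enumerate(any_list):
--         cnt[s] = cnt.get(s, 0) + 1
--         if i >= 4:
--             cnt[any_list[i - 4]] -= 1
--         if i >= 3:
--             c1 = cnt.get("1", 0)
--             c2 = cnt.get("2", 0)
--             cq = cnt.get("?", 0)
--             if c1 + c2 + cq == 4 and (c1 == 0) != (c2 == 0):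
--                 sym, k = ("1", c1) if c1 else ("2", c2)
--                 out += [sym] * (5 if k == 4 else k)
--     return out
-- ===== Notes on version B (the rewrite author's own statement) =====
-- stated objective: faster
-- what changed: Replaces A's per-window slicing with 28 hard-coded pattern-list comparisons by a single incremental pass: a sliding dict counter of the current 4-window is updated in O(1) per position (add the entering symbol, retire the one 4 back) and the lone player's symbol is emitted count-many times (5 for a full window); windows are never materialized.
import Mathlib
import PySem

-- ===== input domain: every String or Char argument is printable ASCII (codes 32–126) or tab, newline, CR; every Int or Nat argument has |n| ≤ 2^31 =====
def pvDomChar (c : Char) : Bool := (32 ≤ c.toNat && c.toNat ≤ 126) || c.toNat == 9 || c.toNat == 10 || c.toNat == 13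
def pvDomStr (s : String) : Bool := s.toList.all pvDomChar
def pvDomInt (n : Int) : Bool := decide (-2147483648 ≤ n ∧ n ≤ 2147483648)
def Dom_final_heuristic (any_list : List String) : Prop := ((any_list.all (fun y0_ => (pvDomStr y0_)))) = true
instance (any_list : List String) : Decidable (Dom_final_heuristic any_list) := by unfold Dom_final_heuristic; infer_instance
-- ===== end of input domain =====

-- B replaces A's per-window slicing and 28 hard-coded pattern comparisons by a single pass
-- maintaining a sliding dict counter of the current 4-window (incremental update, windows
-- never materialized); objective: faster (constant factor).

-- ===== PORT A =====
-- A's four literal pattern tables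
def pvPatsA1 : List (List String) :=
  [["1","?","?","?"],["?","1","?","?"],["?","?","1","?"],["?","?","?","1"],
   ["2","?","?","?"],["?","2","?","?"],["?","?","2","?"],["?","?","?","2"]]
def pvPatsA2 : List (List String) :=
  [["1","1","?","?"],["1","?","1","?"],["1","?","?","1"],["?","1","1","?"],["?","1","?","1"],["?","?","1","1"],
   ["2","2","?","?"],["2","?","2","?"],["2","?","?","2"],["?","2","2","?"],["?","2","?","2"],["?","?","2","2"]]
def pvPatsA3 : List (List String) :=
  [["?","1","1","1"],["1","?","1","1"],["1","1","?","1"],["1","1","1","?"],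
   ["?","2","2","2"],["2","?","2","2"],["2","2","?","2"],["2","2","2","?"]]
def pvPatsA4 : List (List String) := [["1","1","1","1"],["2","2","2","2"]]

-- body of A's while loop for one window `temp`
def pvWinA (temp acc : List String) : List String :=
  let acc :=
    if temp ∈ pvPatsA1 then
      let acc := if "1" ∈ temp then acc ++ ["1"] else acc
      if "2" ∈ temp then acc ++ ["2"] else acc
    else acc
  let acc :=
    if temp ∈ pvPatsA2 then
      let acc := if "1" ∈ temp then acc ++ ["1"] ++ ["1"] else acc
      if "2" ∈ temp then acc ++ ["2"] ++ ["2"] else acc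
    else acc
  let acc :=
    if temp ∈ pvPatsA3 then
      let acc := if "1" ∈ temp then acc ++ ["1"] ++ ["1"] ++ ["1"] else acc
      if "2" ∈ temp then acc ++ ["2"] ++ ["2"] ++ ["2"] else acc
    else acc
  if temp ∈ pvPatsA4 then
    let acc := if "1" ∈ temp then acc ++ ["1"] ++ ["1"] ++ ["1"] ++ ["1"] ++ ["1"] else acc
    if "2" ∈ temp then acc ++ ["2"] ++ ["2"] ++ ["2"] ++ ["2"] ++ ["2"] else acc
  else acc

def final_heuristic (any_list : List String) : List String :=
  (PySem.List.pyRange 0 ((any_list.length : Int) - 3) 1).foldl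
    (fun acc c_index =>
      pvWinA (PySem.List.slice any_list (some c_index) (some (c_index + 4))) acc)
    []

-- ===== PORT B =====
-- body of B's loop for one enumerated element (i, s): bump the sliding counter,
-- retire the element 4 back, and if a full window ends here, emit from the counts
def pvStepB (xs : List String) (st : PySem.Dict String Int × List String) (p : Int × String) :
    PySem.Dict String Int × List String :=
  let cnt := st.1.insert p.2 (st.1.getD p.2 0 + 1)
  let cnt := if 4 ≤ p.1 then cnt.modify (PySem.List.pyGetD xs (p.1 - 4) "") 0 (fun v => v - 1) else cnt
  let out :=
    if 3 ≤ p.1 then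
      let c1 := cnt.getD "1" 0
      let c2 := cnt.getD "2" 0
      let cq := cnt.getD "?" 0
      if c1 + c2 + cq == 4 && ((c1 == 0) != (c2 == 0)) then
        let sk := if c1 ≠ 0 then ("1", c1) else ("2", c2)
        st.2 ++ List.replicate (if sk.2 == 4 then 5 else sk.2).toNat sk.1
      else st.2
    else st.2
  (cnt, out)

def final_heuristic_alt (any_list : List String) : List String :=
  ((PySem.List.enumerate any_list).foldl (pvStepB any_list) (PySem.Dict.empty, [])).2

-- ===== PRECONDITION & SPEC =====
def Spec_final_heuristic (any_list : List String) (out : List String) : Prop := out = final_heuristic_alt any_list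
instance (any_list : List String) (out : List String) : Decidable (Spec_final_heuristic any_list out) := by unfold Spec_final_heuristic; infer_instance

-- ===== CLAIM (what is proved, stated in full; the proofs are below) =====
def Claim_equal_final_heuristic : Prop := ∀ (any_list : List String), Dom_final_heuristic any_list → Spec_final_heuristic any_list (final_heuristic any_list)

-- ===== LEMMAS AND PROOFS =====

-- per-window emission by counts (what B's full-window branch computes)
def pvEmit (w : List String) : List String :=
  let c1 : Int := (w.count "1" : Int)
  let c2 : Int := (w.count "2" : Int)
  let cq : Int := (w.count "?" : Int)
  if c1 + c2 + cq == 4 && ((c1 == 0) != (c2 == 0)) then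
    let sk := if c1 ≠ 0 then ("1", c1) else ("2", c2)
    List.replicate (if sk.2 == 4 then 5 else sk.2).toNat sk.1
  else []

-- classify a string as one of the three meaningful symbols or "other"
inductive PvSym | one | two | q | oth
deriving DecidableEq

def pvTag (s : String) : PvSym :=
  if s = "1" then .one else if s = "2" then .two else if s = "?" then .q else .oth

def pvPatsS1 : List (List PvSym) := pvPatsA1.map (List.map pvTag)
def pvPatsS2 : List (List PvSym) := pvPatsA2.map (List.map pvTag)
def pvPatsS3 : List (List PvSym) := pvPatsA3.map (List.map pvTag)
def pvPatsS4 : List (List PvSym) := pvPatsA4.map (List.map pvTag)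

-- A's per-window contribution, expressed on tags
def pvExtraA (t : List PvSym) : List String :=
  (if t ∈ pvPatsS1 then
      (if PvSym.one ∈ t then ["1"] else []) ++ (if PvSym.two ∈ t then ["2"] else [])
    else []) ++
  (if t ∈ pvPatsS2 then
      (if PvSym.one ∈ t then ["1","1"] else []) ++ (if PvSym.two ∈ t then ["2","2"] else [])
    else []) ++
  (if t ∈ pvPatsS3 then
      (if PvSym.one ∈ t then ["1","1","1"] else []) ++ (if PvSym.two ∈ t then ["2","2","2"] else [])
    else []) ++
  (if t ∈ pvPatsS4 then
      (if PvSym.one ∈ t then ["1","1","1","1","1"] else []) ++ (if PvSym.two ∈ t then ["2","2","2","2","2"] else [])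
    else [])

-- B's emission, expressed on tags
def pvExtraB (t : List PvSym) : List String :=
  let c1 : Int := (t.count .one : Int)
  let c2 : Int := (t.count .two : Int)
  let cq : Int := (t.count .q : Int)
  if c1 + c2 + cq == 4 && ((c1 == 0) != (c2 == 0)) then
    let sk := if c1 ≠ 0 then ("1", c1) else ("2", c2)
    List.replicate (if sk.2 == 4 then 5 else sk.2).toNat sk.1
  else []

def pvEmitA (w : List String) : List String := pvExtraA (w.map pvTag)

theorem pvTag_eq_one (s : String) : pvTag s = .one ↔ s = "1" := by
  unfold pvTag; split_ifs <;> simp_all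

theorem pvTag_eq_two (s : String) : pvTag s = .two ↔ s = "2" := by
  unfold pvTag; split_ifs <;> simp_all

theorem pvTag_eq_q (s : String) : pvTag s = .q ↔ s = "?" := by
  unfold pvTag; split_ifs <;> simp_all

theorem pvTag_faithful (s p : String) (hp : pvTag p ≠ .oth) : pvTag s = pvTag p ↔ s = p := by
  constructor
  · intro h
    cases hv : pvTag p with
    | one => rw [hv] at h; rw [(pvTag_eq_one s).mp h, (pvTag_eq_one p).mp hv]
    | two => rw [hv] at h; rw [(pvTag_eq_two s).mp h, (pvTag_eq_two p).mp hv]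
    | q => rw [hv] at h; rw [(pvTag_eq_q s).mp h, (pvTag_eq_q p).mp hv]
    | oth => exact absurd hv hp
  · intro h; rw [h]

theorem pvMapTag_eq_iff (w p : List String) (hp : ∀ s ∈ p, pvTag s ≠ .oth) :
    w.map pvTag = p.map pvTag ↔ w = p := by
  induction p generalizing w with
  | nil => cases w <;> simp
  | cons a p' ih =>
    cases w with
    | nil => simp
    | cons b w' =>
      simp only [List.map_cons, List.cons.injEq]
      rw [pvTag_faithful b a (hp a (List.mem_cons_self ..)), ih w' (fun s hs => hp s (List.mem_cons_of_mem a hs))]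

theorem pvMem_pats_iff (w : List String) (ps : List (List String))
    (hp : ∀ p ∈ ps, ∀ s ∈ p, pvTag s ≠ .oth) :
    w ∈ ps ↔ w.map pvTag ∈ ps.map (List.map pvTag) := by
  induction ps with
  | nil => simp
  | cons p ps' ih =>
    simp only [List.mem_cons, List.map_cons]
    rw [← pvMapTag_eq_iff w p (hp p (by simp)), ih (fun p' h' s hs => hp p' (by simp [h']) s hs)]

theorem pvMem1 (w : List String) : w ∈ pvPatsA1 ↔ w.map pvTag ∈ pvPatsS1 :=
  pvMem_pats_iff w pvPatsA1 (by decide)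

theorem pvMem2 (w : List String) : w ∈ pvPatsA2 ↔ w.map pvTag ∈ pvPatsS2 :=
  pvMem_pats_iff w pvPatsA2 (by decide)

theorem pvMem3 (w : List String) : w ∈ pvPatsA3 ↔ w.map pvTag ∈ pvPatsS3 :=
  pvMem_pats_iff w pvPatsA3 (by decide)

theorem pvMem4 (w : List String) : w ∈ pvPatsA4 ↔ w.map pvTag ∈ pvPatsS4 :=
  pvMem_pats_iff w pvPatsA4 (by decide)

theorem pvMemOne (w : List String) : "1" ∈ w ↔ PvSym.one ∈ w.map pvTag := by
  simp only [List.mem_map]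
  constructor
  · intro h; exact ⟨"1", h, by decide⟩
  · rintro ⟨s, hs, ht⟩; rw [← (pvTag_eq_one s).mp ht]; exact hs

theorem pvMemTwo (w : List String) : "2" ∈ w ↔ PvSym.two ∈ w.map pvTag := by
  simp only [List.mem_map]
  constructor
  · intro h; exact ⟨"2", h, by decide⟩
  · rintro ⟨s, hs, ht⟩; rw [← (pvTag_eq_two s).mp ht]; exact hs

theorem pvCountOne (w : List String) : w.count "1" = (w.map pvTag).count .one := by
  simp only [List.count_eq_countP, List.countP_map]
  apply List.countP_congr; intro s _
  simp [Function.comp, pvTag_eq_one]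

theorem pvCountTwo (w : List String) : w.count "2" = (w.map pvTag).count .two := by
  simp only [List.count_eq_countP, List.countP_map]
  apply List.countP_congr; intro s _
  simp [Function.comp, pvTag_eq_two]

theorem pvCountQ (w : List String) : w.count "?" = (w.map pvTag).count .q := by
  simp only [List.count_eq_countP, List.countP_map]
  apply List.countP_congr; intro s _
  simp [Function.comp, pvTag_eq_q]

theorem pvWinA_extra (w acc : List String) : pvWinA w acc = acc ++ pvExtraA (w.map pvTag) := by
  simp only [pvWinA, pvExtraA, pvMem1 w, pvMem2 w, pvMem3 w, pvMem4 w, pvMemOne w, pvMemTwo w]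
  split_ifs <;> simp

theorem pvEmit_tags (w : List String) : pvEmit w = pvExtraB (w.map pvTag) := by
  simp only [pvEmit, pvExtraB, pvCountOne w, pvCountTwo w, pvCountQ w]

theorem pvExtra_eq (t : List PvSym) (ht : t.length ≤ 4) : pvExtraA t = pvExtraB t := by
  rcases t with _ | ⟨a, _ | ⟨b, _ | ⟨c, _ | ⟨d, _ | ⟨e, t⟩⟩⟩⟩⟩
  · decide
  · cases a <;> decide
  · cases a <;> cases b <;> decide
  · cases a <;> cases b <;> cases c <;> decide
  · cases a <;> cases b <;> cases c <;> cases d <;> decide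
  · simp at ht; omega

theorem pvEmitA_eq_pvEmit (w : List String) (h : w.length ≤ 4) : pvEmitA w = pvEmit w := by
  rw [pvEmitA, pvEmit_tags, pvExtra_eq _ (by simpa using h)]

-- A as a flatMap over the Nat range of window starts
theorem pvA_flat (xs : List String) :
    final_heuristic xs = (List.range (xs.length - 3)).flatMap (fun k => pvEmitA ((xs.drop k).take 4)) := by
  unfold final_heuristic
  have hcongr := PySem.List.foldl_congr_mem
      (l := PySem.List.pyRange 0 ((xs.length : Int) - 3) 1)
      (f := fun acc c_index => pvWinA (PySem.List.slice xs (some c_index) (some (c_index + 4))) acc)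
      (g := fun acc i => acc ++ pvEmitA (PySem.List.slice xs (some i) (some (i + 4))))
      (init := ([] : List String))
      (by intro acc i _; simp only []; rw [pvWinA_extra]; rfl)
  rw [hcongr, PySem.List.foldl_append_eq_flatMap]
  by_cases hlen : 3 ≤ xs.length
  · have hb : ((xs.length : Int) - 3) = ((xs.length - 3 : Nat) : Int) := by omega
    rw [hb, PySem.List.pyRange_zero_natCast, List.flatMap_map]
    simp only [List.nil_append]
    have hfun : (fun k : Nat => pvEmitA (PySem.List.slice xs (some ((k : Nat) : Int)) (some (((k : Nat) : Int) + 4))))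
        = (fun k : Nat => pvEmitA ((xs.drop k).take 4)) := by
      funext k
      have h4 : ((k : Nat) : Int) + 4 = ((k : Nat) : Int) + ((4 : Nat) : Int) := by norm_num
      rw [h4, PySem.List.slice_natCast_add]
    rw [show (fun k : Nat => (fun i : Int => pvEmitA (PySem.List.slice xs (some i) (some (i + 4)))) ((k : Nat) : Int))
        = (fun k : Nat => pvEmitA ((xs.drop k).take 4)) from hfun]
  · rw [PySem.List.pyRange_one_eq_nil (by omega),
        show xs.length - 3 = 0 from by omega]
    rfl

-- the list of 4-windows, structurally
def pvBlocks : List String → List (List String)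
  | a :: b :: c :: d :: tl => [a, b, c, d] :: pvBlocks (b :: c :: d :: tl)
  | _ => []

theorem pvBlocks_short (l : List String) (h : l.length < 4) : pvBlocks l = [] := by
  rcases l with _ | ⟨a, _ | ⟨b, _ | ⟨c, _ | ⟨d, tl⟩⟩⟩⟩
  · rfl
  · rfl
  · rfl
  · rfl
  · exfalso; simp only [List.length_cons] at h; omega

theorem pvRange_blocks (xs : List String) :
    (List.range (xs.length - 3)).flatMap (fun k => pvEmitA ((xs.drop k).take 4))
      = (pvBlocks xs).flatMap pvEmit := by
  induction xs with
  | nil => rfl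
  | cons a tl ih =>
    rcases tl with _ | ⟨b, _ | ⟨c, _ | ⟨d, t'⟩⟩⟩
    · rfl
    · rfl
    · rfl
    · have hlen : (a :: b :: c :: d :: t').length - 3 = ((b :: c :: d :: t').length - 3) + 1 := by
        simp only [List.length_cons]; omega
      rw [hlen, List.range_succ_eq_map, List.flatMap_cons, List.flatMap_map]
      have h0 : pvEmitA (((a :: b :: c :: d :: t').drop 0).take 4) = pvEmit [a, b, c, d] := by
        rw [List.drop_zero]
        have : (a :: b :: c :: d :: t').take 4 = [a, b, c, d] := rfl
        rw [this, pvEmitA_eq_pvEmit _ (by simp)]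
      rw [h0]
      have hc : pvBlocks (a :: b :: c :: d :: t') = [a, b, c, d] :: pvBlocks (b :: c :: d :: t') := by
        rw [pvBlocks]
      rw [hc, List.flatMap_cons]
      exact congrArg₂ (· ++ ·) rfl ih

-- B's loop spec by prefix recursion
def pvSpec (prev : List String) : List String → List String
  | [] => []
  | s :: tl =>
      (if 4 ≤ prev.length + 1 then pvEmit ((prev ++ [s]).drop (prev.length + 1 - 4)) else [])
        ++ pvSpec (prev ++ [s]) tl

set_option maxRecDepth 4000 in
theorem pvLoopB (xs : List String) (rest : List String) : ∀ (prev : List String)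
    (cnt : PySem.Dict String Int) (out : List String),
    xs = prev ++ rest →
    (∀ v, cnt.getD v 0 = ((prev.drop (prev.length - 4)).count v : Int)) →
    ((PySem.List.enumerate rest (prev.length : Int)).foldl (pvStepB xs) (cnt, out)).2
      = out ++ pvSpec prev rest := by
  induction rest with
  | nil => intro prev cnt out _ _; simp [PySem.List.enumerate, pvSpec]
  | cons s tl ih =>
    intro prev cnt out hxs hc
    rw [PySem.List.enumerate_cons, List.foldl_cons]
    -- the new counter view
    have hview : ∀ v, (pvStepB xs (cnt, out) ((prev.length : Int), s)).1.getD v 0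
        = (((prev ++ [s]).drop (prev.length + 1 - 4)).count v : Int) := by
      intro v
      by_cases h4 : 4 ≤ prev.length
      · have h4i : (4 : Int) ≤ (prev.length : Int) := by exact_mod_cast h4
        have hlt : prev.length - 4 < prev.length := by omega
        have hidx : ((prev.length : Int) - 4) = ((prev.length - 4 : Nat) : Int) := by omega
        have hold : PySem.List.pyGetD xs ((prev.length : Int) - 4) ""
            = prev[prev.length - 4] := by
          rw [hidx, PySem.List.pyGetD_natCast, hxs]
          rw [List.getD_eq_getElem?_getD, List.getElem?_append_left hlt]
          simp [List.getElem?_eq_getElem hlt]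
        have hW : prev.drop (prev.length - 4)
            = prev[prev.length - 4] :: prev.drop (prev.length - 3) := by
          have h := List.drop_eq_getElem_cons hlt
          rw [show prev.length - 4 + 1 = prev.length - 3 from by omega] at h
          exact h
        obtain ⟨old, hold2, hW2⟩ : ∃ o, PySem.List.pyGetD xs ((prev.length : Int) - 4) "" = o ∧
            prev.drop (prev.length - 4) = o :: prev.drop (prev.length - 3) := ⟨_, hold, hW⟩
        simp only [pvStepB, if_pos h4i]
        rw [hold2]
        rw [PySem.Dict.getD_modify, PySem.Dict.getD_insert, PySem.Dict.getD_insert]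
        have hW' : (prev ++ [s]).drop (prev.length + 1 - 4)
            = prev.drop (prev.length - 3) ++ [s] := by
          rw [show prev.length + 1 - 4 = prev.length - 3 from by omega,
              List.drop_append_of_le_length (by omega)]
        rw [hW']
        have h1 := hc v
        have h2 := hc old
        have h3 := hc s
        rw [hW2] at h1 h2 h3
        simp only [List.count_cons, List.count_append, List.count_nil, beq_iff_eq] at h1 h2 h3 ⊢
        clear hc ih hxs hold hold2 hW hW2 hW'
        split_ifs at h1 h2 h3 ⊢ <;> subst_vars <;> first | omega | simp_all
      · have h4i : ¬ (4 : Int) ≤ (prev.length : Int) := by exact_mod_cast h4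
        simp only [pvStepB, if_neg h4i]
        rw [PySem.Dict.getD_insert]
        have hW : prev.drop (prev.length - 4) = prev := by
          have : prev.length - 4 = 0 := by omega
          rw [this, List.drop_zero]
        have hW' : (prev ++ [s]).drop (prev.length + 1 - 4) = prev ++ [s] := by
          have : prev.length + 1 - 4 = 0 := by omega
          rw [this, List.drop_zero]
        rw [hW']
        have h1 := hc v
        have h3 := hc s
        rw [hW] at h1 h3
        simp only [List.count_cons, List.count_append, List.count_nil, beq_iff_eq] at h1 h3 ⊢
        clear hc ih hxs hW hW'
        split_ifs at h1 h3 ⊢ <;> subst_vars <;> first | omega | simp_all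
    -- the output update
    have hout : (pvStepB xs (cnt, out) ((prev.length : Int), s)).2
        = out ++ (if 4 ≤ prev.length + 1 then pvEmit ((prev ++ [s]).drop (prev.length + 1 - 4)) else []) := by
      have hcnt1 := hview "1"
      have hcnt2 := hview "2"
      have hcntq := hview "?"
      by_cases h3 : 3 ≤ prev.length
      · have h3i : (3 : Int) ≤ (prev.length : Int) := by exact_mod_cast h3
        have h41 : 4 ≤ prev.length + 1 := by omega
        conv_lhs => rw [show (pvStepB xs (cnt, out) ((prev.length : Int), s)).2
          = (if 3 ≤ ((prev.length : Int)) then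
              (let c1 := (pvStepB xs (cnt, out) ((prev.length : Int), s)).1.getD "1" 0
               let c2 := (pvStepB xs (cnt, out) ((prev.length : Int), s)).1.getD "2" 0
               let cq := (pvStepB xs (cnt, out) ((prev.length : Int), s)).1.getD "?" 0
               if c1 + c2 + cq == 4 && ((c1 == 0) != (c2 == 0)) then
                 let sk := if c1 ≠ 0 then ("1", c1) else ("2", c2)
                 out ++ List.replicate (if sk.2 == 4 then 5 else sk.2).toNat sk.1
               else out)
            else out) from rfl]
        rw [if_pos h3i, if_pos h41]
        simp only [hcnt1, hcnt2, hcntq, pvEmit]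
        split_ifs <;> simp
      · have h3i : ¬ (3 : Int) ≤ (prev.length : Int) := by exact_mod_cast h3
        have h41 : ¬ 4 ≤ prev.length + 1 := by omega
        rw [if_neg h41]
        simp only [pvStepB, if_neg h3i]
        simp
    -- combine
    have hstep : pvStepB xs (cnt, out) ((prev.length : Int), s)
        = ((pvStepB xs (cnt, out) ((prev.length : Int), s)).1,
           (pvStepB xs (cnt, out) ((prev.length : Int), s)).2) := rfl
    rw [hstep, hout]
    have hstart : (prev.length : Int) + 1 = (((prev ++ [s]).length : Nat) : Int) := by
      simp
    rw [hstart]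
    have hview' : ∀ v, (pvStepB xs (cnt, out) ((prev.length : Int), s)).1.getD v 0
        = (((prev ++ [s]).drop ((prev ++ [s]).length - 4)).count v : Int) := by
      intro v
      rw [show (prev ++ [s]).length - 4 = prev.length + 1 - 4 from by simp]
      exact hview v
    rw [ih (prev ++ [s]) _ _ (by simp [hxs]) hview']
    rw [pvSpec]
    simp

theorem pvB_spec (xs : List String) : final_heuristic_alt xs = pvSpec [] xs := by
  unfold final_heuristic_alt
  have h := pvLoopB xs xs [] PySem.Dict.empty [] (by simp)
    (by intro v; simp [PySem.Dict.getD_empty])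
  simpa using h

theorem pvSpec_blocks (rest : List String) : ∀ (prev : List String),
    pvSpec prev rest = (pvBlocks (prev.drop (prev.length - 3) ++ rest)).flatMap pvEmit := by
  induction rest with
  | nil =>
    intro prev
    rw [pvSpec, List.append_nil, pvBlocks_short _ (by simp [List.length_drop]; omega)]
    rfl
  | cons s tl ih =>
    intro prev
    rw [pvSpec]
    by_cases h3 : 3 ≤ prev.length
    · have hl3 : (prev.drop (prev.length - 3)).length = 3 := by
        simp [List.length_drop]; omega
      obtain ⟨a, b, c, habc⟩ := List.length_eq_three.mp hl3
      have h41 : 4 ≤ prev.length + 1 := by omega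
      rw [if_pos h41]
      have hW' : (prev ++ [s]).drop (prev.length + 1 - 4) = [a, b, c, s] := by
        rw [show prev.length + 1 - 4 = prev.length - 3 from by omega,
            List.drop_append_of_le_length (by omega), habc]
        rfl
      have hblocks : pvBlocks (prev.drop (prev.length - 3) ++ s :: tl)
          = [a, b, c, s] :: pvBlocks (b :: c :: s :: tl) := by
        rw [habc]; rfl
      rw [hW', hblocks, List.flatMap_cons]
      congr 1
      rw [ih (prev ++ [s])]
      have hlen2 : (prev ++ [s]).length - 3 = prev.length - 2 := by
        simp only [List.length_append, List.length_cons, List.length_nil]; omega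
      have hd : (prev ++ [s]).drop ((prev ++ [s]).length - 3) = [b, c, s] := by
        rw [hlen2, List.drop_append_of_le_length (by omega)]
        have h23 : prev.length - 2 = prev.length - 3 + 1 := by omega
        rw [h23, ← List.drop_drop, habc]
        rfl
      rw [hd]
      rfl
    · have h41 : ¬ 4 ≤ prev.length + 1 := by omega
      rw [if_neg h41]
      rw [ih (prev ++ [s])]
      have e1 : prev.drop (prev.length - 3) = prev := by
        rw [show prev.length - 3 = 0 from by omega, List.drop_zero]
      have e2 : (prev ++ [s]).drop ((prev ++ [s]).length - 3) = prev ++ [s] := by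
        rw [show (prev ++ [s]).length - 3 = 0 from by simp; omega, List.drop_zero]
      rw [e1, e2]
      simp

-- ===== VERDICT (by name: the statement is the Claim_ definition above) =====
theorem final_heuristic_spec : Claim_equal_final_heuristic := by
  intro xs _
  unfold Spec_final_heuristic
  rw [pvA_flat, pvRange_blocks, pvB_spec, pvSpec_blocks]
  rfl
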